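-- pv_equiv track=rewrite | github.com/Verathragna/house-blueprint-generator | evaluation/refinement.py | _build_type_index
-- ===== SOURCE A (Python) =====
-- from typing import Dict, Iterable, List, Optional, Sequence, Tuple
--
-- def _build_type_index(rooms: Sequence[Dict]) -> Dict[str, List[Dict]]:
--     index: Dict[str, List[Dict]] = {}
--     for room in rooms:
--         key = (room.get("type") or "").strip().lower()
--         if not key:
--             continue
--         index.setdefault(key, []).append(room)
--     return index
-- ===== SOURCE B (Python) =====
-- def _build_type_index(rooms):
--     def norm(room):
--         return (room.get("type") or "").strip().lower()
--     keys = dict.fromkeys(k for k in map(norm, rooms) if k)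
--     return {k: [room for room in rooms if norm(room) == k] for k in keys}
-- ===== Notes on version B (the rewrite author's own statement) =====
-- stated objective: alternative
-- what changed: Replaced the single-pass setdefault/append accumulation with a two-phase plan: first collect the distinct non-empty normalized keys in first-occurrence order via dict.fromkeys, then build the result as a dict comprehension that filters the room list once per key.
import Mathlib
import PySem

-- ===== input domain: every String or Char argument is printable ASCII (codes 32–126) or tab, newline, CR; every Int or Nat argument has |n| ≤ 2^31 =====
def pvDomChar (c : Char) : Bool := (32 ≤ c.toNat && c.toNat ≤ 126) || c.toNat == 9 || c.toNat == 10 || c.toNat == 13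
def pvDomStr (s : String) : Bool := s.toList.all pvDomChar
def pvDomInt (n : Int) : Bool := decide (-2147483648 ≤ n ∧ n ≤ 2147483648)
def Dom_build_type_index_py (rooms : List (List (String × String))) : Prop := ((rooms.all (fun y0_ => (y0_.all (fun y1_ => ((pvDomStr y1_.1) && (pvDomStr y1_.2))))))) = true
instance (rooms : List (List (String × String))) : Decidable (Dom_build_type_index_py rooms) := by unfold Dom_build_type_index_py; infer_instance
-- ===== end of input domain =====

-- B replaces A's single-pass setdefault accumulation by a two-phase plan (dedup the
-- non-empty normalized keys, then one filter pass per key); alternative, not faster.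

-- (room.get("type") or "").strip().lower(): getD "" is exact since '' is falsy.
def pvKey (room : List (String × String)) : String :=
  PySem.Str.lower (PySem.Str.strip (((PySem.Dict.mk room).get? "type").getD ""))

-- ===== PORT A =====
def build_type_index_py (rooms : List (List (String × String))) : List (String × List (List (String × String))) :=
  (rooms.foldl (fun d room =>
      let key := pvKey room
      if key = "" then d
      else d.modify key [] (· ++ [room]))
    PySem.Dict.empty).items

-- ===== PORT B =====
def build_type_index_py_alt (rooms : List (List (String × String))) : List (String × List (List (String × String))) :=
  let keys := PySem.List.dedup ((rooms.map pvKey).filter (fun k => !(k == "")))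
  keys.map (fun k => (k, rooms.filter (fun room => pvKey room == k)))

-- ===== PRECONDITION & SPEC =====
def Spec_build_type_index_py (rooms : List (List (String × String))) (out : List (String × List (List (String × String)))) : Prop := out = build_type_index_py_alt rooms
instance (rooms : List (List (String × String))) (out : List (String × List (List (String × String)))) : Decidable (Spec_build_type_index_py rooms out) := by unfold Spec_build_type_index_py; infer_instance

-- ===== CLAIM (what is proved, stated in full; the proofs are below) =====
def Claim_equal_build_type_index_py : Prop := ∀ (rooms : List (List (String × String))), Dom_build_type_index_py rooms → Spec_build_type_index_py rooms (build_type_index_py rooms)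

-- ===== LEMMAS AND PROOFS =====

theorem pvKeysInsert {ν : Type} (d : PySem.Dict String ν) (k : String) (v : ν) :
    (d.insert k v).keys = PySem.Set.add d.keys k := by
  rw [PySem.Set.add_eq_ite]
  by_cases h : k ∈ d.keys
  · rw [if_pos h]
    have hc : d.contains k = true := by
      rw [PySem.Dict.contains_eq_decide_mem_keys]; simpa
    simp only [PySem.Dict.keys, PySem.Dict.items_insert_of_contains d v hc, List.map_map]
    apply List.map_congr_left
    intro p _
    by_cases hp : (p.1 == k) = true <;> simp_all
  · rw [if_neg h]
    have hc : d.contains k = false := by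
      rw [PySem.Dict.contains_eq_decide_mem_keys]; simpa
    simp [PySem.Dict.keys, PySem.Dict.items_insert_of_not_contains d v hc]

-- the loop body of A's port, named for the lemmas
def pvStep (d : PySem.Dict String (List (List (String × String)))) (room : List (String × String)) : PySem.Dict String (List (List (String × String))) :=
  let key := pvKey room
  if key = "" then d else d.modify key [] (· ++ [room])

theorem pvStep_getD (rooms : List (List (String × String)))
    (d : PySem.Dict String (List (List (String × String)))) (k : String) (hk : k ≠ "") :
    (rooms.foldl pvStep d).getD k [] = d.getD k [] ++ rooms.filter (fun room => pvKey room == k) := by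
  induction rooms generalizing d with
  | nil => simp
  | cons r rs ih =>
    simp only [List.foldl_cons, List.filter_cons]
    rw [ih]
    by_cases h : pvKey r = ""
    · have : (pvKey r == k) = false := by simp [h, Ne.symm hk]
      simp [pvStep, h, hk]
    · simp only [pvStep, h, if_false]
      by_cases hkk : pvKey r = k
      · subst hkk
        rw [PySem.Dict.getD_modify]
        simp
      · rw [PySem.Dict.getD_modify]
        have : (pvKey r == k) = false := by simp [hkk]
        simp [Ne.symm hkk, this]

theorem pvStep_keys (rooms : List (List (String × String)))
    (d : PySem.Dict String (List (List (String × String)))) :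
    (rooms.foldl pvStep d).keys = PySem.Set.update d.keys ((rooms.map pvKey).filter (fun k => !(k == ""))) := by
  induction rooms generalizing d with
  | nil => simp [PySem.Set.update]
  | cons r rs ih =>
    simp only [List.foldl_cons, List.map_cons, List.filter_cons]
    rw [ih]
    by_cases h : pvKey r = ""
    · simp [pvStep, h]
    · have hb : (!(pvKey r == "")) = true := by simp [h]
      simp only [hb, if_true]
      rw [PySem.Set.update_cons]
      have hkeys : (pvStep d r).keys = PySem.Set.add d.keys (pvKey r) := by
        simp only [pvStep, h, if_false]
        rw [PySem.Dict.keys_modify, pvKeysInsert]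
      rw [hkeys]

theorem pvFold_keys (rooms : List (List (String × String))) :
    (rooms.foldl pvStep PySem.Dict.empty).keys
      = PySem.List.dedup ((rooms.map pvKey).filter (fun k => !(k == ""))) := by
  rw [pvStep_keys]
  simp [PySem.Dict.empty, PySem.Dict.keys, PySem.Set.update_nil_left]

-- ===== VERDICT (by name: the statement is the Claim_ definition above) =====
theorem build_type_index_py_spec : Claim_equal_build_type_index_py := by
  intro rooms _
  unfold Spec_build_type_index_py build_type_index_py build_type_index_py_alt
  have hfold : (fun d room =>
      let key := pvKey room
      if key = "" then d
      else PySem.Dict.modify d key [] (· ++ [room])) = pvStep := rfl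
  rw [hfold]
  have hnd : (rooms.foldl pvStep PySem.Dict.empty).keys.Nodup := by
    rw [pvFold_keys]; exact PySem.List.nodup_dedup _
  rw [PySem.Dict.items_eq_map_keys _ hnd []]
  rw [pvFold_keys]
  apply List.map_congr_left
  intro k hkmem
  have hk : k ≠ "" := by
    have := (PySem.List.mem_dedup _ _).mp hkmem
    have := List.of_mem_filter this
    simpa using this
  rw [pvStep_getD _ _ _ hk]
  simp [PySem.Dict.empty, PySem.Dict.getD, PySem.Dict.get?]
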